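-- pv_equiv track=rewrite | github.com/cern-fts/fts-rest-flask | src/fts3rest/fts3rest/lib/middleware/fts3auth/credentials.py | vo_from_fqan
-- ===== SOURCE A (Python) =====
-- def vo_from_fqan(fqan):
--     """
--     Get the VO from a full FQAN
--
--     Args:
--         fqan: A single fqans (i.e. /dteam/cern/Role=lcgadmin)
--     Returns:
--         The vo + group (i.e. dteam/cern)
--     """
--     components = fqan.split("/")[1:]
--     groups = []
--     for c in components:
--         if c.lower().startswith("role="):
--             break
--         groups.append(c)
--     return "/".join(groups)
-- ===== SOURCE B (Python) =====
-- def vo_from_fqan(fqan):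
--     i = fqan.lower().find("/role=")
--     head = fqan if i < 0 else fqan[:i]
--     return "/".join(head.split("/")[1:])
-- ===== Notes on version B (the rewrite author's own statement) =====
-- stated objective: idiomatic
-- what changed: Replaces the per-component loop with a break by a single case-insensitive find of the first slash-role boundary in the whole string, slicing the string there and rejoining the components after the first.
import Mathlib
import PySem

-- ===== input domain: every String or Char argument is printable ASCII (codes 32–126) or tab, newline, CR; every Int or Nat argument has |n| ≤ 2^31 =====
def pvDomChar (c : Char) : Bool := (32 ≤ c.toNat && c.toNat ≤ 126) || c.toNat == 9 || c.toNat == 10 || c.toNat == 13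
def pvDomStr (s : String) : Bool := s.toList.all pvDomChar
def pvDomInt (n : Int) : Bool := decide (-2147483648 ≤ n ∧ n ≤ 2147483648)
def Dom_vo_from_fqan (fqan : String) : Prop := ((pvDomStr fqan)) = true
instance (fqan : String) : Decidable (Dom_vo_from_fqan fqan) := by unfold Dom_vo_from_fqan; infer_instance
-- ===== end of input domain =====

-- B replaces A's per-component loop-with-break by one case-insensitive find of the first "/role=" boundary
-- and a slice (objective: idiomatic; same asymptotic cost).

-- ===== PORT A =====
-- the 'for c in components: if c.lower().startswith("role="): break; groups.append(c)' loop
def pvALoop : List String → List String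
  | [] => []
  | c :: rest =>
    if PySem.Str.startswith (PySem.Str.lower c) "role=" then []
    else c :: pvALoop rest

def vo_from_fqan (fqan : String) : String :=
  let components := PySem.List.slice (((PySem.Str.split? fqan "/").getD [])) (some 1) none
  PySem.Str.join "/" (pvALoop components)

-- ===== PORT B =====
def vo_from_fqan_alt (fqan : String) : String :=
  let i := PySem.Str.find (PySem.Str.lower fqan) "/role="
  let head := if i < 0 then fqan else PySem.Str.slice fqan none (some i)
  PySem.Str.join "/" (PySem.List.slice (((PySem.Str.split? head "/").getD [])) (some 1) none)

-- ===== PRECONDITION & SPEC =====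
def Spec_vo_from_fqan (fqan : String) (out : String) : Prop := out = vo_from_fqan_alt fqan
instance (fqan : String) (out : String) : Decidable (Spec_vo_from_fqan fqan out) := by unfold Spec_vo_from_fqan; infer_instance

-- ===== CLAIM (what is proved, stated in full; the proofs are below) =====
def Claim_equal_vo_from_fqan : Prop := ∀ (fqan : String), Dom_vo_from_fqan fqan → Spec_vo_from_fqan fqan (vo_from_fqan fqan)

-- ===== LEMMAS AND PROOFS =====

-- the pattern "role=" on the char level, and the offending-component predicate
def pvR : List Char := ['r', 'o', 'l', 'e', '=']
def pvP (p : List Char) : Bool := PySem.Chars.startswith (PySem.Chars.lower p) pvR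

-- specification-level Python split by the single char '/'
def pvSplit1 : List Char → List (List Char)
  | [] => [[]]
  | c :: rest => if c = '/' then [] :: pvSplit1 rest else (pvSplit1 rest).modifyHead (c :: ·)

theorem pvSplit1_ne_nil (l : List Char) : pvSplit1 l ≠ [] := by
  cases l with
  | nil => simp [pvSplit1]
  | cons c rest =>
    simp only [pvSplit1]
    split
    · simp
    · cases h : pvSplit1 rest with
      | nil => exact absurd h (pvSplit1_ne_nil rest)
      | cons a t => simp


theorem pvSplitOn_go_eq (fuel : Nat) (l cur : List Char) (acc : List (List Char))
    (h : l.length < fuel) :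
    PySem.Chars.splitOn.go ['/'] fuel l cur acc
      = acc.reverse ++ (pvSplit1 l).modifyHead (cur.reverse ++ ·) := by
  induction fuel generalizing l cur acc with
  | zero => omega
  | succ n ih =>
    cases l with
    | nil =>
      rw [PySem.Chars.splitOn.go.eq_2 _ _ _ _ (by omega)]
      simp [pvSplit1]
    | cons c rest =>
      rw [PySem.Chars.splitOn.go.eq_def]
      simp only []
      by_cases hc : c = '/'
      · subst hc
        have hpre : ['/'].isPrefixOf ('/' :: rest) = true := by simp [List.isPrefixOf]
        rw [if_pos hpre]
        rw [ih _ _ _ (by simp at h ⊢; omega)]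
        cases hs : pvSplit1 rest with
        | nil => exact absurd hs (pvSplit1_ne_nil rest)
        | cons a t => simp [pvSplit1, hs]
      · rw [if_neg (by simp [List.isPrefixOf_cons₂]; exact fun hh => hc hh.symm)]
        rw [ih _ _ _ (by simp at h ⊢; omega)]
        cases hs : pvSplit1 rest with
        | nil => exact absurd hs (pvSplit1_ne_nil rest)
        | cons a t => simp [pvSplit1, hs, hc]

theorem pvSplitOn_eq (l : List Char) : PySem.Chars.splitOn l ['/'] = pvSplit1 l := by
  unfold PySem.Chars.splitOn
  rw [pvSplitOn_go_eq _ _ _ _ (by omega)]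
  cases hs : pvSplit1 l with
  | nil => exact absurd hs (pvSplit1_ne_nil l)
  | cons a t => simp

theorem pvSplit1_noslash {l : List Char} {p : List Char} (hp : p ∈ pvSplit1 l) : '/' ∉ p := by
  induction l generalizing p with
  | nil => simp [pvSplit1] at hp; simp [hp]
  | cons c rest ih =>
    simp only [pvSplit1] at hp
    by_cases hc : c = '/'
    · simp [hc] at hp
      rcases hp with h | h
      · simp [h]
      · exact ih h
    · simp [hc] at hp
      cases h : pvSplit1 rest with
      | nil => exact absurd h (pvSplit1_ne_nil rest)
      | cons a t =>
        rw [h] at hp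
        simp only [List.modifyHead_cons, List.mem_cons] at hp
        rcases hp with h2 | h2
        · subst h2
          intro hm
          rcases List.mem_cons.mp hm with h3 | h3
          · exact hc h3.symm
          · exact ih (h ▸ List.mem_cons_self) h3
        · exact ih (h ▸ List.mem_cons_of_mem _ h2)

theorem pvJoin_pvSplit1 (l : List Char) : PySem.Chars.join ['/'] (pvSplit1 l) = l := by
  induction l with
  | nil => simp [pvSplit1, PySem.Chars.join, List.intercalate]
  | cons c rest ih =>
    simp only [pvSplit1]
    by_cases hc : c = '/'
    · subst hc
      simp only [if_true]
      cases h : pvSplit1 rest with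
      | nil => exact absurd h (pvSplit1_ne_nil rest)
      | cons a t =>
        rw [h] at ih
        rw [PySem.Chars.join_cons_cons, ← ih]
        simp
    · simp only [if_neg hc]
      cases h : pvSplit1 rest with
      | nil => exact absurd h (pvSplit1_ne_nil rest)
      | cons a t =>
        rw [h] at ih
        rw [List.modifyHead_cons]
        cases t with
        | nil =>
          rw [PySem.Chars.join_singleton] at ih ⊢
          rw [ih]
        | cons b t2 =>
          rw [PySem.Chars.join_cons_cons] at ih ⊢
          rw [← ih]
          simp

theorem pvSplit1_single {p : List Char} (hp : '/' ∉ p) : pvSplit1 p = [p] := by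
  induction p with
  | nil => simp [pvSplit1]
  | cons c p ih =>
    have hc : c ≠ '/' := fun h => hp (h ▸ List.mem_cons_self)
    have hp' : '/' ∉ p := fun h => hp (List.mem_cons_of_mem _ h)
    simp [pvSplit1, hc, ih hp']


theorem pvSplit1_append {p : List Char} (l : List Char) (hp : '/' ∉ p) :
    pvSplit1 (p ++ l) = (pvSplit1 l).modifyHead (p ++ ·) := by
  induction p with
  | nil =>
    cases h : pvSplit1 l with
    | nil => exact absurd h (pvSplit1_ne_nil l)
    | cons a t => simpa using h
  | cons c p ih =>
    have hc : c ≠ '/' := fun h => hp (h ▸ List.mem_cons_self)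
    have hp' : '/' ∉ p := fun h => hp (List.mem_cons_of_mem _ h)
    rw [List.cons_append]
    simp only [pvSplit1, hc, if_false, ih hp']
    cases h : pvSplit1 l with
    | nil => exact absurd h (pvSplit1_ne_nil l)
    | cons a t => simp


theorem pvSplit1_join {parts : List (List Char)} {p0 : List Char}
    (h : ∀ p ∈ p0 :: parts, '/' ∉ p) :
    pvSplit1 (PySem.Chars.join ['/'] (p0 :: parts)) = p0 :: parts := by
  induction parts generalizing p0 with
  | nil =>
    rw [PySem.Chars.join_singleton]
    exact pvSplit1_single (h p0 List.mem_cons_self)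
  | cons p1 rest ih =>
    rw [PySem.Chars.join_cons_cons, List.append_assoc, List.singleton_append,
      pvSplit1_append _ (h p0 List.mem_cons_self)]
    simp only [pvSplit1]
    rw [ih (fun p hp => h p (List.mem_cons_of_mem _ hp))]
    simp

theorem pvLowerChar_ne_slash {c : Char} (h : c ≠ '/') : PySem.Chars.lowerChar c ≠ '/' := by
  unfold PySem.Chars.lowerChar
  split
  · rename_i hu
    simp only [PySem.Chars.isupper, Bool.and_eq_true, decide_eq_true_eq, Char.le_def] at hu
    have h1 : (65 : Nat) ≤ c.toNat := hu.1
    have h2 : c.toNat ≤ 90 := hu.2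
    intro heq
    have ht := Char.toNat_ofNat (c.toNat + 32)
    rw [if_pos (Or.inl (by omega) : (c.toNat + 32).isValidChar), heq] at ht
    have : ('/' : Char).toNat = 47 := by decide
    omega
  · exact h

theorem pvLower_noslash {p : List Char} (h : '/' ∉ p) : '/' ∉ PySem.Chars.lower p := by
  intro hm
  simp only [PySem.Chars.lower, List.mem_map] at hm
  obtain ⟨c, hc, hlc⟩ := hm
  exact pvLowerChar_ne_slash (fun h2 => h (h2 ▸ hc)) hlc

theorem pvFind_neg_of_noslash {v : List Char} (h : '/' ∉ v) :
    PySem.Chars.find v ('/' :: pvR) = -1 := by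
  rw [PySem.Chars.find_eq_neg_one_iff]
  intro hin
  exact h (hin.subset List.mem_cons_self)

theorem pvPrefix_cut {w a b : List Char} (hw : '/' ∉ w) (h : w <+: a ++ '/' :: b) : w <+: a := by
  by_cases hlen : w.length ≤ a.length
  · obtain ⟨t, ht⟩ := h
    have : w = (a ++ '/' :: b).take w.length := by
      rw [← ht, List.take_left']
      rfl
    rw [List.take_append_of_le_length hlen] at this
    rw [this]
    exact List.take_prefix _ _
  · exfalso
    have hlt : a.length < w.length := by omega
    have hlt2 : a.length < (a ++ '/' :: b).length := by simp
    have := h.getElem hlt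
    rw [List.getElem_append_right (by omega)] at this
    simp at this
    exact hw (this ▸ List.getElem_mem hlt)

theorem pvFind_eq_of {s sub : List Char} (j : Nat) (hj : sub <+: s.drop j)
    (hmin : ∀ i < j, ¬ sub <+: s.drop i) : PySem.Chars.find s sub = (j : Int) := by
  have hin : sub <:+: s := hj.isInfix.trans (List.drop_suffix j s).isInfix
  have hpos : 0 ≤ PySem.Chars.find s sub := (PySem.Chars.find_nonneg_iff s sub).mpr hin
  obtain ⟨h1, h2⟩ := PySem.Chars.find_spec hpos
  have hne : (PySem.Chars.find s sub).toNat = j := by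
    rcases Nat.lt_trichotomy (PySem.Chars.find s sub).toNat j with hlt | heq | hgt
    · exact absurd h1 (hmin _ hlt)
    · exact heq
    · exact absurd hj (h2 _ hgt)
  omega

theorem pvALoop_eq (ps : List (List Char)) :
    pvALoop (ps.map String.ofList) = (ps.takeWhile (fun p => !pvP p)).map String.ofList := by
  induction ps with
  | nil => simp [pvALoop]
  | cons p rest ih =>
    have hsw : PySem.Str.startswith (PySem.Str.lower (String.ofList p)) "role=" = pvP p := by
      simp only [PySem.Str.startswith, PySem.Str.lower, String.toList_ofList, pvP]
      rfl
    simp only [List.map_cons, pvALoop, hsw, List.takeWhile_cons]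
    by_cases hp : pvP p
    · simp [hp]
    · simp only [Bool.not_eq_true] at hp
      simp [hp, ih]


theorem pvLowerChar_slash : PySem.Chars.lowerChar '/' = '/' := by decide

theorem pvLower_append (a b : List Char) :
    PySem.Chars.lower (a ++ b) = PySem.Chars.lower a ++ PySem.Chars.lower b := by
  simp [PySem.Chars.lower]

theorem pvLower_slash_cons (v : List Char) :
    PySem.Chars.lower ('/' :: v) = '/' :: PySem.Chars.lower v := by
  simp [PySem.Chars.lower, pvLowerChar_slash]

theorem pvLower_length (a : List Char) : (PySem.Chars.lower a).length = a.length := by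
  simp [PySem.Chars.lower]

theorem pvDrop_far (a v : List Char) (k : Nat) :
    (a ++ '/' :: v).drop (a.length + 1 + k) = v.drop k := by
  have : a.length + 1 + k = a.length + (1 + k) := by omega
  rw [this, ← List.drop_drop, List.drop_left]
  have h2 : 1 + k = k + 1 := by omega
  rw [h2, List.drop_succ_cons]

theorem pvNoPat_front {a : List Char} (v : List Char) (ha : '/' ∉ a) {i : Nat} (hi : i < a.length) :
    ¬ ('/' :: pvR) <+: (a ++ '/' :: v).drop i := by
  intro hpre
  have h0 := hpre.getElem (i := 0) (by simp)
  rw [List.getElem_drop] at h0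
  rw [List.getElem_append_left (by omega)] at h0
  simp only [List.getElem_cons_zero] at h0
  exact ha (h0 ▸ List.getElem_mem _)

theorem pvP_of_prefix {c : List Char} (rest' : List (List Char))
    (h : pvR <+: PySem.Chars.lower (PySem.Chars.join ['/'] (c :: rest'))) : pvP c = true := by
  cases rest' with
  | nil =>
    rw [PySem.Chars.join_singleton] at h
    exact (PySem.Chars.startswith_iff _ _).mpr h
  | cons d t =>
    rw [PySem.Chars.join_cons_cons, List.append_assoc, List.singleton_append,
      pvLower_append, pvLower_slash_cons] at h
    have := pvPrefix_cut (by decide) h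
    exact (PySem.Chars.startswith_iff _ _).mpr this

theorem pvPrefix_of_pvP {c : List Char} (rest' : List (List Char)) (hP : pvP c = true) :
    pvR <+: PySem.Chars.lower (PySem.Chars.join ['/'] (c :: rest')) := by
  have h := (PySem.Chars.startswith_iff _ _).mp hP
  cases rest' with
  | nil => rw [PySem.Chars.join_singleton]; exact h
  | cons d t =>
    rw [PySem.Chars.join_cons_cons, List.append_assoc, List.singleton_append, pvLower_append]
    exact h.trans (List.prefix_append _ _)

theorem pvMain (rest : List (List Char)) (p0 : List Char) (h0 : '/' ∉ p0)
    (h : ∀ p ∈ rest, '/' ∉ p) :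
    (rest.takeWhile (fun p => !pvP p) = rest →
      PySem.Chars.find (PySem.Chars.lower (PySem.Chars.join ['/'] (p0 :: rest))) ('/' :: pvR) = -1)
    ∧ (rest.takeWhile (fun p => !pvP p) ≠ rest →
      PySem.Chars.find (PySem.Chars.lower (PySem.Chars.join ['/'] (p0 :: rest))) ('/' :: pvR)
        = ((PySem.Chars.join ['/'] (p0 :: rest.takeWhile (fun p => !pvP p))).length : Int)
      ∧ PySem.Chars.join ['/'] (p0 :: rest.takeWhile (fun p => !pvP p))
          <+: PySem.Chars.join ['/'] (p0 :: rest)) := by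
  induction rest generalizing p0 with
  | nil =>
    refine ⟨fun _ => ?_, fun hne => absurd rfl hne⟩
    rw [PySem.Chars.join_singleton]
    exact pvFind_neg_of_noslash (pvLower_noslash h0)
  | cons c rest' ih =>
    have hc : '/' ∉ c := h c List.mem_cons_self
    have hrest' : ∀ p ∈ rest', '/' ∉ p := fun p hp => h p (List.mem_cons_of_mem _ hp)
    have hJ : PySem.Chars.join ['/'] (p0 :: c :: rest')
        = p0 ++ '/' :: PySem.Chars.join ['/'] (c :: rest') := by
      rw [PySem.Chars.join_cons_cons, List.append_assoc, List.singleton_append]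
    set t := PySem.Chars.join ['/'] (c :: rest') with ht
    have hLJ : PySem.Chars.lower (p0 ++ '/' :: t)
        = PySem.Chars.lower p0 ++ '/' :: PySem.Chars.lower t := by
      rw [pvLower_append, pvLower_slash_cons]
    have hl0 : '/' ∉ PySem.Chars.lower p0 := pvLower_noslash h0
    have hlen : (PySem.Chars.lower p0).length = p0.length := pvLower_length p0
    by_cases hP : pvP c = true
    · have htw : (c :: rest').takeWhile (fun p => !pvP p) = [] := by
        simp [hP]
      constructor
      · intro habs
        rw [htw] at habs
        exact absurd habs.symm (List.cons_ne_nil _ _)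
      · intro _
        rw [htw, PySem.Chars.join_singleton, hJ, hLJ]
        constructor
        · apply pvFind_eq_of p0.length
          · rw [← hlen, List.drop_left, List.cons_prefix_cons]
            exact ⟨rfl, pvPrefix_of_pvP rest' hP⟩
          · intro i hi
            rw [hLJ] at *
            exact pvNoPat_front _ hl0 (by omega)
        · exact List.prefix_append _ _
    · have htw : (c :: rest').takeWhile (fun p => !pvP p)
          = c :: rest'.takeWhile (fun p => !pvP p) := by
        simp [hP]
      obtain ⟨ih1, ih2⟩ := ih c hc hrest'
      by_cases hTW : rest'.takeWhile (fun p => !pvP p) = rest'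
      · constructor
        · intro _
          rw [hJ, hLJ, PySem.Chars.find_eq_neg_one_iff]
          intro hinf
          obtain ⟨j, hj⟩ := (PySem.Chars.exists_prefix_drop_iff_isIn _ _).mpr
            ((PySem.Chars.isIn_iff_infix _ _).mpr hinf)
          rcases Nat.lt_trichotomy j p0.length with hlt | heq | hgt
          · exact pvNoPat_front _ hl0 (show j < (PySem.Chars.lower p0).length by omega) hj
          · rw [heq, ← hlen, List.drop_left, List.cons_prefix_cons] at hj
            exact hP (pvP_of_prefix rest' hj.2)
          · have hdrop : (PySem.Chars.lower p0 ++ '/' :: PySem.Chars.lower t).drop j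
                = (PySem.Chars.lower t).drop (j - p0.length - 1) := by
              rw [← hlen] at hgt ⊢
              have : j = (PySem.Chars.lower p0).length + 1 + (j - (PySem.Chars.lower p0).length - 1) := by omega
              rw [this, pvDrop_far]
              congr 1
              omega
            rw [hdrop] at hj
            have hneg := ih1 hTW
            rw [PySem.Chars.find_eq_neg_one_iff] at hneg
            exact hneg (hj.isInfix.trans (List.drop_suffix _ _).isInfix)
        · intro hne
          rw [htw, hTW] at hne
          exact absurd rfl hne
      · obtain ⟨hf', hpre'⟩ := ih2 hTW
        set W' := PySem.Chars.join ['/'] (c :: rest'.takeWhile (fun p => !pvP p)) with hW'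
        have hJW : PySem.Chars.join ['/'] (p0 :: c :: rest'.takeWhile (fun p => !pvP p))
            = p0 ++ '/' :: W' := by
          rw [hW', PySem.Chars.join_cons_cons, List.append_assoc, List.singleton_append]
        have hfpos : (0 : Int) ≤ PySem.Chars.find (PySem.Chars.lower t) ('/' :: pvR) := by
          rw [hf']; positivity
        obtain ⟨hp1, hp2⟩ := PySem.Chars.find_spec hfpos
        rw [hf', Int.toNat_natCast] at hp1 hp2
        constructor
        · intro habs
          rw [htw] at habs
          injection habs with _ h2
          exact absurd h2 hTW
        · intro _
          rw [htw, hJ, hJW]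
          constructor
          · rw [hLJ]
            have hlenW : (p0 ++ '/' :: W').length = p0.length + 1 + W'.length := by
              simp
              omega
            rw [hlenW]
            apply pvFind_eq_of (p0.length + 1 + W'.length)
            · rw [← hlen, pvDrop_far]
              exact hp1
            · intro i hi
              rcases Nat.lt_trichotomy i p0.length with hlt | heq | hgt
              · exact pvNoPat_front _ hl0 (show i < (PySem.Chars.lower p0).length by omega)
              · rw [heq, ← hlen, List.drop_left, List.cons_prefix_cons]
                intro hcontra
                exact hP (pvP_of_prefix rest' hcontra.2)
              · have hdrop : (PySem.Chars.lower p0 ++ '/' :: PySem.Chars.lower t).drop i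
                    = (PySem.Chars.lower t).drop (i - p0.length - 1) := by
                  rw [← hlen] at hgt ⊢
                  have : i = (PySem.Chars.lower p0).length + 1 + (i - (PySem.Chars.lower p0).length - 1) := by omega
                  rw [this, pvDrop_far]
                  congr 1
                  omega
                rw [hdrop]
                exact hp2 _ (by omega)
          · refine (List.prefix_append_right_inj p0).mpr ?_
            rw [List.cons_prefix_cons]
            exact ⟨rfl, hpre'⟩

-- ===== VERDICT (by name: the statement is the Claim_ definition above) =====
-- components of a string after Python split("/"), on the char level
theorem pvComponents (u : String) :
    ((PySem.Str.split? u "/").getD []) = (pvSplit1 u.toList).map String.ofList := by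
  simp only [PySem.Str.split?, PySem.Chars.split?]
  rw [show ("/" : String).toList = ['/'] from by decide]
  simp [pvSplitOn_eq]

theorem vo_from_fqan_spec : Claim_equal_vo_from_fqan := by
  intro fqan _hd
  unfold Spec_vo_from_fqan vo_from_fqan vo_from_fqan_alt
  simp only [PySem.List.slice_from_one, pvComponents]
  set s : List Char := fqan.toList with hs
  have hpat : ("/role=" : String).toList = '/' :: pvR := by decide
  have hfind : PySem.Str.find (PySem.Str.lower fqan) "/role="
      = PySem.Chars.find (PySem.Chars.lower s) ('/' :: pvR) := by
    simp only [PySem.Str.find, PySem.Str.lower, String.toList_ofList, hpat, hs]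
  cases hparts : pvSplit1 s with
  | nil => exact absurd hparts (pvSplit1_ne_nil s)
  | cons p0 rest =>
    have hnos : ∀ p ∈ p0 :: rest, '/' ∉ p := fun p hp => pvSplit1_noslash (hparts ▸ hp)
    have hjoin : PySem.Chars.join ['/'] (p0 :: rest) = s := by
      rw [← hparts, pvJoin_pvSplit1]
    have h0 : '/' ∉ p0 := hnos p0 List.mem_cons_self
    have hrest : ∀ p ∈ rest, '/' ∉ p := fun p hp => hnos p (List.mem_cons_of_mem _ hp)
    obtain ⟨m1, m2⟩ := pvMain rest p0 h0 hrest
    simp only [List.map_cons, List.tail_cons]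
    by_cases hTW : rest.takeWhile (fun p => !pvP p) = rest
    · have hneg : PySem.Str.find (PySem.Str.lower fqan) "/role=" = -1 := by
        rw [hfind, ← hjoin]
        exact m1 hTW
      rw [hneg, if_pos (by norm_num), ← hs, hparts]
      simp only [List.map_cons, List.tail_cons]
      rw [pvALoop_eq, hTW]
    · obtain ⟨hf, hpre⟩ := m2 hTW
      set W := PySem.Chars.join ['/'] (p0 :: rest.takeWhile (fun p => !pvP p)) with hW
      have hfW : PySem.Str.find (PySem.Str.lower fqan) "/role=" = (W.length : Int) := by
        rw [hfind, ← hjoin]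
        exact hf
      rw [hfW, if_neg (by omega)]
      have hhead : (PySem.Str.slice fqan none (some (W.length : Int))).toList = W := by
        rw [PySem.Str.toList_slice, PySem.Chars.slice_eq_listSlice,
          PySem.List.slice_to _ (by omega)]
        rw [Int.toNat_natCast, ← hs]
        rw [hjoin] at hpre
        exact (List.prefix_iff_eq_take.mp hpre).symm
      have hsplitW : pvSplit1 (PySem.Str.slice fqan none (some (W.length : Int))).toList
          = p0 :: rest.takeWhile (fun p => !pvP p) := by
        rw [hhead, hW, pvSplit1_join]
        intro p hp
        rcases List.mem_cons.mp hp with h1 | h1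
        · exact h1 ▸ h0
        · exact hrest p ((List.takeWhile_sublist _).subset h1)
      rw [hsplitW]
      simp only [List.map_cons, List.tail_cons]
      rw [pvALoop_eq]
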